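-- pv_equiv track=rewrite | github.com/Pan-will/LeetCode | 数组/985. 查询后的偶数和.py | sumEvenAfterQueries2
-- ===== SOURCE A (Python) =====
-- def sumEvenAfterQueries2(A, queries):
--     """
--     :type A: List[int]
--     :type queries: List[List[int]]
--     :rtype: List[int]
--     """
--     # 返回值
--     ans = []
--     # 统计原list中偶数元素的和
--     temp = 0
--     for i in range(len(A)):
--         if A[i] % 2 == 0:
--             temp += A[i]
--     for j in range(len(A)):
--         val = queries[j][0]
--         index = queries[j][1]
--         # 若将要改变的元素是偶数，则要从和中减掉
--         if A[index] % 2 == 0: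
--             temp -= A[index]
--         # 改变元素
--         A[index] += val
--         # 若改变以后是偶数，则要加到和中
--         if A[index] % 2 == 0:
--             temp += A[index]
--         ans.append(temp)
--     return ans
-- ===== SOURCE B (Python) =====
-- def sumEvenAfterQueries2(A, queries):
--     ans = []
--     for q in queries:
--         A[q[1]] += q[0]
--         ans.append(sum(x for x in A if x % 2 == 0))
--     return ans
-- ===== Notes on version B (the rewrite author's own statement) =====
-- stated objective: simpler
-- what changed: B drops the incremental even-sum maintenance and simply rescans the whole list after each in-place update (sum of evens per query), and it iterates over the queries themselves instead of A's buggy range(len(A)).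
-- intended difference: When len(queries) > len(A), A's loop 'for j in range(len(A))' processes only the first len(A) queries and returns a list of length len(A), while B answers every query (one even-sum per query), which is what the task specifies. — e.g. on sumEvenAfterQueries2([2], [[1, 0], [1, 0]]): A returns [0], B returns [0, 4]
-- outside the precondition, e.g. on sumEvenAfterQueries2([], [[1, 0]]): A returns [], B raises IndexError; on sumEvenAfterQueries2([2], [[1, 0], [3, 5]]): A returns [0], B raises IndexError
import Mathlib
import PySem

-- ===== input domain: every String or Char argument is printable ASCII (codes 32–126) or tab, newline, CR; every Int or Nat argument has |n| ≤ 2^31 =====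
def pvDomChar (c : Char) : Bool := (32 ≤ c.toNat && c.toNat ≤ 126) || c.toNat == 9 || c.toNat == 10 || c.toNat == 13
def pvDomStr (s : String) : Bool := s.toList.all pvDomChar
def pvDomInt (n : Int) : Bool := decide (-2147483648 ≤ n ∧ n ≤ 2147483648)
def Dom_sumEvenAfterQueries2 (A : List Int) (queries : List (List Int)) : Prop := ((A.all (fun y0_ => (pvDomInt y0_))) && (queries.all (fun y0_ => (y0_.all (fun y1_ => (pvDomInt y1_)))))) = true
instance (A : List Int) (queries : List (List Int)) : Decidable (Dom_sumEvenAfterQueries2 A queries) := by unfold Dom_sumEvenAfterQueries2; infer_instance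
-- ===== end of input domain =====

-- B recomputes the even-sum by a full rescan after each in-place update and loops over the
-- queries themselves instead of A's range(len(A)); both Pythons mutate the argument A in
-- place identically on the common prefix, and the claim here is about the RETURN value only.

-- ===== PORT A =====
-- loop body of A's second for-loop (state: (A, temp, ans); q = queries[j])
def pvStepA (s : List Int × Int × List Int) (q : List Int) : List Int × Int × List Int :=
  let val := PySem.List.pyGetD q 0 0
  let index := PySem.List.pyGetD q 1 0
  let temp1 := if PySem.Int.mod (PySem.List.pyGetD s.1 index 0) 2 = 0
               then s.2.1 - PySem.List.pyGetD s.1 index 0 else s.2.1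
  let Arr := PySem.List.pySetD s.1 index (PySem.List.pyGetD s.1 index 0 + val)
  let temp2 := if PySem.Int.mod (PySem.List.pyGetD Arr index 0) 2 = 0
               then temp1 + PySem.List.pyGetD Arr index 0 else temp1
  (Arr, temp2, s.2.2 ++ [temp2])

def sumEvenAfterQueries2 (A : List Int) (queries : List (List Int)) : List Int :=
  let temp : Int := (PySem.List.pyRange 0 (PySem.List.len A) 1).foldl
    (fun temp i => if PySem.Int.mod (PySem.List.pyGetD A i 0) 2 = 0
                   then temp + PySem.List.pyGetD A i 0 else temp) 0
  ((PySem.List.pyRange 0 (PySem.List.len A) 1).foldl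
    (fun s j => pvStepA s (PySem.List.pyGetD queries j [])) (A, temp, [])).2.2

-- ===== PORT B =====
-- loop body of B's for-loop (state: (A, ans))
def pvStepB (s : List Int × List Int) (q : List Int) : List Int × List Int :=
  let Arr := PySem.List.pySetD s.1 (PySem.List.pyGetD q 1 0)
    (PySem.List.pyGetD s.1 (PySem.List.pyGetD q 1 0) 0 + PySem.List.pyGetD q 0 0)
  (Arr, s.2 ++ [(Arr.filter (fun x => PySem.Int.mod x 2 == 0)).foldl (· + ·) 0])

def sumEvenAfterQueries2_alt (A : List Int) (queries : List (List Int)) : List Int :=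
  (queries.foldl pvStepB (A, ([] : List Int))).2

-- ===== PRECONDITION & SPEC =====
-- Pre_ excludes exactly the inputs on which one of the two programs raises IndexError:
-- A raises when len(queries) < len(A) or some of the first len(A) queries is short / has an
-- out-of-range index; B additionally needs the trailing queries (which A never reads) to be
-- well-formed, since B answers every query — see claim.json "cites" for excluded examples
-- on which A still returns.
def Pre_sumEvenAfterQueries2 (A : List Int) (queries : List (List Int)) : Prop :=
  A.length ≤ queries.length ∧
  ∀ q ∈ queries, 2 ≤ q.length ∧ PySem.Raise.InRange A.length (q.getD 1 0)

instance (A : List Int) (queries : List (List Int)) : Decidable (Pre_sumEvenAfterQueries2 A queries) := by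
  unfold Pre_sumEvenAfterQueries2 PySem.Raise.InRange; infer_instance

def pvWitness_sumEvenAfterQueries2 : List Int × List (List Int) := ([1, 2], [[1, 0], [2, 1]])

-- When len(queries) > len(A), A's loop 'for j in range(len(A))' processes only the first
-- len(A) queries and returns a list of length len(A), while B answers every query (one
-- even-sum per query), which is what the task specifies.
def D_sumEvenAfterQueries2 (A : List Int) (queries : List (List Int)) : Prop :=
  A.length < queries.length
instance (A : List Int) (queries : List (List Int)) : Decidable (D_sumEvenAfterQueries2 A queries) := by
  unfold D_sumEvenAfterQueries2; infer_instance

def Spec_sumEvenAfterQueries2 (A : List Int) (queries : List (List Int)) (out : List Int) : Prop :=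
  ¬ D_sumEvenAfterQueries2 A queries → out = sumEvenAfterQueries2_alt A queries
instance (A : List Int) (queries : List (List Int)) (out : List Int) : Decidable (Spec_sumEvenAfterQueries2 A queries out) := by
  unfold Spec_sumEvenAfterQueries2; infer_instance

def pvDiffWitness_sumEvenAfterQueries2 : List Int × List (List Int) := ([2], [[1, 0], [1, 0]])
def pvDiffWitnessOut_sumEvenAfterQueries2 : (List Int) × (List Int) := ([0], [0, 4])

-- ===== CLAIM (what is proved, stated in full; the proofs are below) =====
def Claim_unchanged_sumEvenAfterQueries2 : Prop := ∀ (A : List Int) (queries : List (List Int)), Dom_sumEvenAfterQueries2 A queries → Pre_sumEvenAfterQueries2 A queries → Spec_sumEvenAfterQueries2 A queries (sumEvenAfterQueries2 A queries)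
def Claim_changed_sumEvenAfterQueries2 : Prop := Dom_sumEvenAfterQueries2 (pvDiffWitness_sumEvenAfterQueries2.1) (pvDiffWitness_sumEvenAfterQueries2.2) ∧ Pre_sumEvenAfterQueries2 (pvDiffWitness_sumEvenAfterQueries2.1) (pvDiffWitness_sumEvenAfterQueries2.2) ∧ D_sumEvenAfterQueries2 (pvDiffWitness_sumEvenAfterQueries2.1) (pvDiffWitness_sumEvenAfterQueries2.2) ∧ sumEvenAfterQueries2 (pvDiffWitness_sumEvenAfterQueries2.1) (pvDiffWitness_sumEvenAfterQueries2.2) = pvDiffWitnessOut_sumEvenAfterQueries2.1 ∧ sumEvenAfterQueries2_alt (pvDiffWitness_sumEvenAfterQueries2.1) (pvDiffWitness_sumEvenAfterQueries2.2) = pvDiffWitnessOut_sumEvenAfterQueries2.2 ∧ pvDiffWitnessOut_sumEvenAfterQueries2.1 ≠ pvDiffWitnessOut_sumEvenAfterQueries2.2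
def Claim_exact_sumEvenAfterQueries2 : Prop := ∀ (A : List Int) (queries : List (List Int)), Dom_sumEvenAfterQueries2 A queries → Pre_sumEvenAfterQueries2 A queries → D_sumEvenAfterQueries2 A queries → sumEvenAfterQueries2 A queries ≠ sumEvenAfterQueries2_alt A queries

-- ===== LEMMAS AND PROOFS =====

-- even-part of one element and even-sum of a list (the quantity both programs track)
def pvE (x : Int) : Int := if PySem.Int.mod x 2 = 0 then x else 0
def pvES (xs : List Int) : Int := (xs.map pvE).sum

theorem pvIdx_spec {α : Type} (xs : List α) (i : Int) (h : PySem.Raise.InRange xs.length i) :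
    ∃ k : Nat, PySem.List.pyIdx? xs.length i = some k ∧ k < xs.length := by
  obtain ⟨h1, h2⟩ := h
  unfold PySem.List.pyIdx?
  by_cases h0 : 0 ≤ i
  · exact ⟨i.toNat, by simp [h0, h2], by omega⟩
  · exact ⟨xs.length - (-i).toNat, by simp [h0, h1], by omega⟩

theorem pvGetD_idx {α : Type} (xs : List α) (i : Int) (d : α) (k : Nat)
    (hk : PySem.List.pyIdx? xs.length i = some k) (hlt : k < xs.length) :
    PySem.List.pyGetD xs i d = xs[k] := by
  simp [PySem.List.pyGetD, PySem.List.pyGet?, hk, hlt]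

theorem pvSetD_idx {α : Type} (xs : List α) (i : Int) (v : α) (k : Nat)
    (hk : PySem.List.pyIdx? xs.length i = some k) :
    PySem.List.pySetD xs i v = xs.set k v := by
  simp [PySem.List.pySetD, PySem.List.pySet?, hk]

theorem pvES_set (xs : List Int) (k : Nat) (v : Int) (h : k < xs.length) :
    pvES (xs.set k v) = pvES xs - pvE xs[k] + pvE v := by
  induction xs generalizing k with
  | nil => simp at h
  | cons x xs ih =>
    cases k with
    | zero => simp [pvES]; ring
    | succ k =>
      simp only [List.set, pvES, List.map, List.sum_cons, List.getElem_cons_succ] at *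
      rw [ih k (by simpa using h)]
      ring

theorem pvES_filter (xs : List Int) :
    (xs.filter (fun x => PySem.Int.mod x 2 == 0)).foldl (· + ·) 0 = pvES xs := by
  have hs : ∀ l : List Int, l.foldl (· + ·) (0 : Int) = l.sum := by
    intro l; rw [List.sum_eq_foldl]
  rw [hs]
  induction xs with
  | nil => rfl
  | cons x xs ih =>
    rw [List.filter_cons]
    by_cases hx : PySem.Int.mod x 2 = 0
    · have he : pvE x = x := by unfold pvE; rw [if_pos hx]
      rw [if_pos (by simpa using hx), List.sum_cons, ih]
      simp [pvES, he]
    · have he : pvE x = 0 := by unfold pvE; rw [if_neg hx]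
      rw [if_neg (by simpa using hx), ih]
      simp [pvES, he]

theorem pv_foldl_pvE (xs : List Int) : ∀ t : Int,
    xs.foldl (fun temp x => if PySem.Int.mod x 2 = 0 then temp + x else temp) t
      = t + pvES xs := by
  induction xs with
  | nil => intro t; simp [pvES]
  | cons x xs ih =>
    intro t
    rw [List.foldl_cons, ih]
    by_cases hx : PySem.Int.mod x 2 = 0
    · have he : pvE x = x := by unfold pvE; rw [if_pos hx]
      rw [if_pos hx]
      simp [pvES, he]
      ring
    · have he : pvE x = 0 := by unfold pvE; rw [if_neg hx]
      rw [if_neg hx]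
      simp [pvES, he]

theorem pv_first_loop (A : List Int) :
    (PySem.List.pyRange 0 (PySem.List.len A) 1).foldl
      (fun temp i => if PySem.Int.mod (PySem.List.pyGetD A i 0) 2 = 0
                     then temp + PySem.List.pyGetD A i 0 else temp) 0 = pvES A := by
  rw [show (PySem.List.len A) = ((A.length : Int)) from by simp]
  rw [PySem.List.foldl_pyRange_zero_pyGetD' A 0
        (fun temp x => if PySem.Int.mod x 2 = 0 then temp + x else temp) 0]
  rw [pv_foldl_pvE, zero_add]

theorem pvGetD_one (q : List Int) (h : 2 ≤ q.length) :
    PySem.List.pyGetD q 1 0 = q.getD 1 0 := by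
  match q, h with
  | a :: b :: t, _ =>
    simp [PySem.List.pyGetD, PySem.List.pyGet?, PySem.List.pyIdx?]

theorem pv_step (Arr : List Int) (q : List Int) (h2 : 2 ≤ q.length)
    (hr : PySem.Raise.InRange Arr.length (q.getD 1 0)) (ans ansB : List Int) :
    pvStepA (Arr, pvES Arr, ans) q
      = ((pvStepB (Arr, ansB) q).1, pvES ((pvStepB (Arr, ansB) q).1),
         ans ++ [pvES ((pvStepB (Arr, ansB) q).1)])
    ∧ (pvStepB (Arr, ansB) q).2 = ansB ++ [pvES ((pvStepB (Arr, ansB) q).1)]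
    ∧ ((pvStepB (Arr, ansB) q).1).length = Arr.length := by
  obtain ⟨k, hk, hlt⟩ := pvIdx_spec Arr (q.getD 1 0) hr
  have hq1 : PySem.List.pyGetD q 1 0 = q.getD 1 0 := pvGetD_one q h2
  have hget : PySem.List.pyGetD Arr (q.getD 1 0) 0 = Arr[k] := pvGetD_idx Arr _ 0 k hk hlt
  have hset : ∀ v, PySem.List.pySetD Arr (q.getD 1 0) v = Arr.set k v :=
    fun v => pvSetD_idx Arr _ v k hk
  have hget' : ∀ v, PySem.List.pyGetD (Arr.set k v) (q.getD 1 0) 0 = v := by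
    intro v
    have hk' : PySem.List.pyIdx? (Arr.set k v).length (q.getD 1 0) = some k := by
      rw [List.length_set]; exact hk
    rw [pvGetD_idx _ _ 0 k hk' (by simpa using hlt)]
    simp
  have hkey : (if PySem.Int.mod (Arr[k] + PySem.List.pyGetD q 0 0) 2 = 0
      then (if PySem.Int.mod Arr[k] 2 = 0 then pvES Arr - Arr[k] else pvES Arr)
             + (Arr[k] + PySem.List.pyGetD q 0 0)
      else (if PySem.Int.mod Arr[k] 2 = 0 then pvES Arr - Arr[k] else pvES Arr))
      = pvES (Arr.set k (Arr[k] + PySem.List.pyGetD q 0 0)) := by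
    rw [pvES_set Arr k _ hlt]
    unfold pvE
    split_ifs <;> ring
  refine ⟨?_, ?_, by simp [pvStepB]⟩
  · simp only [pvStepA, pvStepB, hq1, hget, hset, hget']
    rw [hkey]
  · simp only [pvStepB, hq1, hget, hset]
    rw [pvES_filter]

theorem pvB_shift (qs : List (List Int)) : ∀ (Arr a : List Int),
    (qs.foldl pvStepB (Arr, a)).2 = a ++ (qs.foldl pvStepB (Arr, [])).2 := by
  induction qs with
  | nil => intro Arr a; simp
  | cons q qs ih =>
    intro Arr a
    simp only [List.foldl_cons, pvStepB]
    rw [ih, ih _ ([] ++ _)]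
    simp

theorem pv_loop (qs : List (List Int)) : ∀ (Arr ans : List Int),
    (∀ q ∈ qs, 2 ≤ q.length ∧ PySem.Raise.InRange Arr.length (q.getD 1 0)) →
    (qs.foldl pvStepA (Arr, pvES Arr, ans)).2.2
      = ans ++ (qs.foldl pvStepB (Arr, [])).2 := by
  induction qs with
  | nil => intro Arr ans _; simp
  | cons q qs ih =>
    intro Arr ans hq
    obtain ⟨hA, hB, hlen⟩ :=
      pv_step Arr q (hq q (by simp)).1 (hq q (by simp)).2 ans []
    rw [List.foldl_cons, hA, List.foldl_cons,
      ih _ _ (fun q' hq' => by rw [hlen]; exact hq q' (by simp [hq']))]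
    have h2 : pvStepB (Arr, []) q
        = ((pvStepB (Arr, []) q).1, [pvES ((pvStepB (Arr, []) q).1)]) := by
      exact Prod.ext rfl (by simpa using hB)
    conv_rhs => rw [h2]
    rw [pvB_shift qs ((pvStepB (Arr, []) q).1) [pvES ((pvStepB (Arr, []) q).1)]]
    simp

theorem pv_lenA (queries : List (List Int)) (l : List Int) : ∀ (s : List Int × Int × List Int),
    ((l.foldl (fun s j => pvStepA s (PySem.List.pyGetD queries j [])) s).2.2).length
      = s.2.2.length + l.length := by
  induction l with
  | nil => intro s; simp
  | cons j l ih =>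
    intro s
    rw [List.foldl_cons, ih]
    simp [pvStepA]
    omega

theorem pv_lenB (qs : List (List Int)) : ∀ (s : List Int × List Int),
    ((qs.foldl pvStepB s).2).length = s.2.length + qs.length := by
  induction qs with
  | nil => intro s; simp
  | cons q qs ih =>
    intro s
    rw [List.foldl_cons, ih]
    simp [pvStepB]
    omega

-- ===== VERDICT (by name: the statement is the Claim_ definition above) =====
theorem sumEvenAfterQueries2_spec : Claim_unchanged_sumEvenAfterQueries2 := by
  intro A queries _ hPre hnD
  show sumEvenAfterQueries2 A queries = sumEvenAfterQueries2_alt A queries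
  have hlen : (A.length : Int) = (queries.length : Int) := by
    have h1 := hPre.1
    have h2 : ¬ A.length < queries.length := hnD
    omega
  unfold sumEvenAfterQueries2 sumEvenAfterQueries2_alt
  show ((PySem.List.pyRange 0 (PySem.List.len A) 1).foldl
      (fun s j => pvStepA s (PySem.List.pyGetD queries j []))
      (A, (PySem.List.pyRange 0 (PySem.List.len A) 1).foldl
        (fun temp i => if PySem.Int.mod (PySem.List.pyGetD A i 0) 2 = 0
                       then temp + PySem.List.pyGetD A i 0 else temp) 0, [])).2.2
    = (queries.foldl pvStepB (A, [])).2
  rw [pv_first_loop]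
  rw [show (PySem.List.len A) = ((A.length : Int)) from by simp, hlen]
  rw [PySem.List.foldl_pyRange_zero_pyGetD' queries [] pvStepA (A, pvES A, [])]
  rw [pv_loop queries A [] (fun q hq => hPre.2 q hq)]
  simp

theorem sumEvenAfterQueries2_changed : Claim_changed_sumEvenAfterQueries2 := by
  unfold Claim_changed_sumEvenAfterQueries2; decide

theorem sumEvenAfterQueries2_tight : Claim_exact_sumEvenAfterQueries2 := by
  intro A queries _ _ hD h
  have hA : (sumEvenAfterQueries2 A queries).length = A.length := by
    unfold sumEvenAfterQueries2
    rw [pv_lenA]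
    simp [PySem.List.length_pyRange_one]
  have hB : (sumEvenAfterQueries2_alt A queries).length = queries.length := by
    unfold sumEvenAfterQueries2_alt
    rw [pv_lenB]
    simp
  have hD' : A.length < queries.length := hD
  rw [h, hB] at hA
  omega
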